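-- pv_equiv track=rewrite | github.com/GiulioMGB/Midterm_Giulio | Question_5.py | find_b_bob_occurrences
-- ===== SOURCE A (Python) =====
-- def find_b_bob_occurrences(text):
--     # Initialize a count variable to keep track of matches
--     count = 0
--
--     # Convert the text to lowercase to make the search case-insensitive
--     text = text.lower()
--
--     # Loop through each character in the text
--     for i in range(len(text)):
--         # Check if the current character is 'b'
--         if text[i] == 'b':
--             # Look ahead in the text for the substring ending with "bob"
--             # We use a loop to check each subsequent character until we find "bob"
--             for j in range(i + 1, len(text)):
--                 # If we find a substring that ends with "bob", increase the count
--                 if text[j:j + 3] == 'bob':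
--                     count += 1
--                     break  # Exit the inner loop once a match is found
--
--     return count
-- ===== SOURCE B (Python) =====
-- def find_b_bob_occurrences(text):
--     # One linear pass: maintain running count of 'b's seen so far; whenever a
--     # "bob" starts at i, the answer becomes the number of 'b's strictly before i.
--     text = text.lower()
--     count_b = 0
--     answer = 0
--     for i in range(len(text)):
--         if text[i:i + 3] == 'bob':
--             answer = count_b
--         if text[i] == 'b':
--             count_b += 1
--     return answer
-- ===== Notes on version B (the rewrite author's own statement) =====
-- stated objective: faster
-- what changed: Replaced A's per-'b' look-ahead inner scan for a later "bob" with a single stateful pass that keeps a running count of b's and records it each time a "bob" starts.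
import Mathlib
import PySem

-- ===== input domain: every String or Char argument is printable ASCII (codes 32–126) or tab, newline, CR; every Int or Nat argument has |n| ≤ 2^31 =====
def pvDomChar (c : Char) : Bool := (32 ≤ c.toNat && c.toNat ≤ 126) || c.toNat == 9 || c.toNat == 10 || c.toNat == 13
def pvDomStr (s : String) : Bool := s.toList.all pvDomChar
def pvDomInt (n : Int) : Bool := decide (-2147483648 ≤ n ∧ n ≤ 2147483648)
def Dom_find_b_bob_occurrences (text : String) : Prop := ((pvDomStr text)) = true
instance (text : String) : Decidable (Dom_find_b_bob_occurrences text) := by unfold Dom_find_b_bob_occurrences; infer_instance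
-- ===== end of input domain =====

-- B replaces A's per-'b' look-ahead inner scan for a later "bob" with a single
-- stateful linear pass that keeps a running count of 'b's seen so far.

-- ===== PORT A =====
-- the inner 'for j in range(i + 1, len(text))' loop with its break
def pvInnerA (l : List Char) (js : List Int) (count : Int) : Int :=
  match js with
  | [] => count
  | j :: rest =>
      if PySem.List.slice l (some j) (some (j + 3)) = ['b', 'o', 'b'] then count + 1
      else pvInnerA l rest count

def find_b_bob_occurrences (text : String) : Int :=
  let l := PySem.Chars.lower text.toList
  (PySem.List.pyRange 0 (l.length : Int) 1).foldl
    (fun count i =>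
      if PySem.List.pyGetD l i ' ' = 'b' then
        pvInnerA l (PySem.List.pyRange (i + 1) (l.length : Int) 1) count
      else count) 0

-- ===== PORT B =====
-- state is (count_b, answer)
def find_b_bob_occurrences_alt (text : String) : Int :=
  let l := PySem.Chars.lower text.toList
  let st := (PySem.List.pyRange 0 (l.length : Int) 1).foldl
    (fun (st : Int × Int) i =>
      let st1 := if PySem.List.slice l (some i) (some (i + 3)) = ['b', 'o', 'b']
                 then (st.1, st.1) else st
      if PySem.List.pyGetD l i ' ' = 'b' then (st1.1 + 1, st1.2) else st1)
    ((0 : Int), (0 : Int))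
  st.2

-- ===== PRECONDITION & SPEC =====
def Spec_find_b_bob_occurrences (text : String) (out : Int) : Prop := out = find_b_bob_occurrences_alt text
instance (text : String) (out : Int) : Decidable (Spec_find_b_bob_occurrences text out) := by unfold Spec_find_b_bob_occurrences; infer_instance

-- ===== CLAIM (what is proved, stated in full; the proofs are below) =====
def Claim_equal_find_b_bob_occurrences : Prop := ∀ (text : String), Dom_find_b_bob_occurrences text → Spec_find_b_bob_occurrences text (find_b_bob_occurrences text)

-- ===== LEMMAS AND PROOFS =====

-- 'text[i] == "b"' on the lowered character list
def pvBAt (l : List Char) (i : Nat) : Bool := l.getD i ' ' == 'b'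
-- 'text[j:j+3] == "bob"'
def pvBobAt (l : List Char) (j : Nat) : Bool := (l.drop j).take 3 == ['b', 'o', 'b']
-- number of 'b's among the first k characters
def pvCountB (l : List Char) (k : Nat) : Nat := (List.range k).countP (pvBAt l)
-- closed form of B's 'answer' after processing the first m indices
def pvAns (l : List Char) : Nat → Int
  | 0 => 0
  | m + 1 => if pvBobAt l m then (pvCountB l m : Int) else pvAns l m
-- the predicate A counts, with the look-ahead bounded by m
def pvP (l : List Char) (m i : Nat) : Bool :=
  pvBAt l i && (List.range m).any (fun j => decide (i < j) && pvBobAt l j)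

theorem pvSlice_nat (l : List Char) (m : Nat) :
    PySem.List.slice l (some (m : Int)) (some ((m : Int) + 3)) = (l.drop m).take 3 := by
  have h3 : ((m : Nat) : Int) + 3 = ((m : Nat) : Int) + ((3 : Nat) : Int) := by norm_num
  rw [h3, PySem.List.slice_natCast_add]

theorem pvInnerA_spec (l : List Char) (js : List Int) (c : Int) :
    pvInnerA l js c =
      if ∃ j ∈ js, PySem.List.slice l (some j) (some (j + 3)) = ['b', 'o', 'b'] then c + 1 else c := by
  induction js with
  | nil => simp [pvInnerA]
  | cons j rest ih =>
      simp only [pvInnerA, ih, List.mem_cons]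
      by_cases h : PySem.List.slice l (some j) (some (j + 3)) = ['b', 'o', 'b'] <;> simp [h]

theorem pvExists_iff (l : List Char) (i : Nat) :
    (∃ j ∈ PySem.List.pyRange ((i : Int) + 1) (l.length : Int) 1,
        PySem.List.slice l (some j) (some (j + 3)) = ['b', 'o', 'b']) ↔
      ((List.range l.length).any (fun j => decide (i < j) && pvBobAt l j)) = true := by
  simp only [List.any_eq_true, List.mem_range, PySem.List.mem_pyRange_one, pvBobAt,
    Bool.and_eq_true, decide_eq_true_eq, beq_iff_eq]
  constructor
  · rintro ⟨j, ⟨h1, h2⟩, hs⟩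
    refine ⟨j.toNat, by omega, by omega, ?_⟩
    have hj : j = ((j.toNat : Nat) : Int) := by omega
    rw [hj, pvSlice_nat] at hs
    exact hs
  · rintro ⟨j, hj, hij, hb⟩
    exact ⟨(j : Int), ⟨by omega, by omega⟩, by rw [pvSlice_nat]; exact hb⟩

theorem pvA_eq (text : String) :
    find_b_bob_occurrences text =
      (((List.range (PySem.Chars.lower text.toList).length).countP
        (pvP (PySem.Chars.lower text.toList) (PySem.Chars.lower text.toList).length) : Nat) : Int) := by
  set l := PySem.Chars.lower text.toList with hl
  show (PySem.List.pyRange 0 (l.length : Int) 1).foldl _ 0 = _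
  rw [PySem.List.pyRange_one]
  simp only [zero_add, Int.sub_zero, Int.toNat_natCast, List.foldl_map]
  rw [PySem.List.foldl_congr_mem _ _
      (fun (c : Int) (k : Nat) => c + (if pvP l l.length k then (1 : Int) else 0)) 0 ?_]
  · rw [PySem.List.foldl_add, PySem.List.sum_map_ite_one_zero]
    exact zero_add _
  · intro c k hk
    simp only [PySem.List.pyGetD_natCast]
    rw [pvInnerA_spec]
    by_cases hb : l.getD k ' ' = 'b'
    · rw [if_pos hb]
      by_cases he : (∃ j ∈ PySem.List.pyRange ((k : Int) + 1) (l.length : Int) 1,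
          PySem.List.slice l (some j) (some (j + 3)) = ['b', 'o', 'b'])
      · rw [if_pos he]
        have hP : pvP l l.length k = true := by
          simp only [pvP, Bool.and_eq_true, pvBAt, beq_iff_eq]
          exact ⟨hb, (pvExists_iff l k).mp he⟩
        rw [if_pos hP]
      · rw [if_neg he]
        have hP : ¬ (pvP l l.length k = true) := by
          simp only [pvP, Bool.and_eq_true, pvBAt, beq_iff_eq]
          rintro ⟨-, hq⟩
          exact he ((pvExists_iff l k).mpr hq)
        rw [if_neg hP]
        omega
    · rw [if_neg hb]
      have hP : ¬ (pvP l l.length k = true) := by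
        simp only [pvP, Bool.and_eq_true, pvBAt, beq_iff_eq]
        rintro ⟨h1, -⟩
        exact hb h1
      rw [if_neg hP]
      omega

theorem pvCountB_succ (l : List Char) (m : Nat) :
    pvCountB l (m + 1) = pvCountB l m + (if pvBAt l m then 1 else 0) := by
  simp [pvCountB, List.range_succ]

theorem pvB_inv (l : List Char) (m : Nat) :
    (List.range m).foldl
      (fun (st : Int × Int) (k : Nat) =>
        let st1 := if PySem.List.slice l (some (k : Int)) (some ((k : Int) + 3)) = ['b', 'o', 'b']
                   then (st.1, st.1) else st
        if PySem.List.pyGetD l (k : Int) ' ' = 'b' then (st1.1 + 1, st1.2) else st1)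
      ((0 : Int), (0 : Int)) = ((pvCountB l m : Int), pvAns l m) := by
  induction m with
  | zero => simp [pvCountB, pvAns]
  | succ m ih =>
      rw [List.range_succ, List.foldl_append, ih]
      simp only [List.foldl_cons, List.foldl_nil]
      rw [pvSlice_nat]
      simp only [PySem.List.pyGetD_natCast]
      rw [pvCountB_succ]
      rcases Bool.eq_false_or_eq_true (pvBobAt l m) with hbob | hbob <;>
        rcases Bool.eq_false_or_eq_true (pvBAt l m) with hb | hb
      · have hbob' : (l.drop m).take 3 = ['b', 'o', 'b'] := by simpa [pvBobAt] using hbob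
        have hb' : l[m]?.getD ' ' = 'b' := by simpa [pvBAt, List.getD] using hb
        simp [pvAns, hbob, hb, hbob', hb']
      · have hbob' : (l.drop m).take 3 = ['b', 'o', 'b'] := by simpa [pvBobAt] using hbob
        have hb' : ¬ (l[m]?.getD ' ' = 'b') := by simpa [pvBAt, List.getD] using hb
        simp [pvAns, hbob, hb, hbob', hb']
      · have hbob' : ¬ ((l.drop m).take 3 = ['b', 'o', 'b']) := by simpa [pvBobAt] using hbob
        have hb' : l[m]?.getD ' ' = 'b' := by simpa [pvBAt, List.getD] using hb
        simp [pvAns, hbob, hb, hbob', hb']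
      · have hbob' : ¬ ((l.drop m).take 3 = ['b', 'o', 'b']) := by simpa [pvBobAt] using hbob
        have hb' : ¬ (l[m]?.getD ' ' = 'b') := by simpa [pvBAt, List.getD] using hb
        simp [pvAns, hbob, hb, hbob', hb']

theorem pvB_eq (text : String) :
    find_b_bob_occurrences_alt text = pvAns (PySem.Chars.lower text.toList) (PySem.Chars.lower text.toList).length := by
  set l := PySem.Chars.lower text.toList with hl
  show ((PySem.List.pyRange 0 (l.length : Int) 1).foldl _ ((0 : Int), (0 : Int))).2 = _
  rw [PySem.List.pyRange_one]
  simp only [zero_add, Int.sub_zero, Int.toNat_natCast, List.foldl_map]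
  rw [pvB_inv]

theorem pvAns_countP (l : List Char) (m : Nat) :
    pvAns l m = (((List.range m).countP (pvP l m) : Nat) : Int) := by
  induction m with
  | zero => simp [pvAns]
  | succ m ih =>
      have hlast : pvP l (m + 1) m = false := by
        have hany : ((List.range (m + 1)).any fun j => decide (m < j) && pvBobAt l j) = false := by
          rw [List.any_eq_false]
          intro j hj
          simp only [List.mem_range] at hj
          simp [show ¬ (m < j) by omega]
        simp [pvP, hany]
      rw [List.range_succ, List.countP_append]
      rcases Bool.eq_false_or_eq_true (pvBobAt l m) with hbob | hbob
      · -- a "bob" starts at m: every earlier index has a later "bob"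
        have hcong : ∀ i ∈ List.range m, pvP l (m + 1) i = pvBAt l i := by
          intro i hi
          simp only [List.mem_range] at hi
          have hany : ((List.range (m + 1)).any (fun j => decide (i < j) && pvBobAt l j)) = true := by
            simp only [List.any_eq_true, List.mem_range]
            exact ⟨m, by omega, by simp [hi, hbob]⟩
          simp [pvP, hany]
        rw [List.countP_congr (fun x hx => by rw [hcong x hx])]
        simp only [List.countP_cons, List.countP_nil, hlast]
        simp [pvAns, hbob, pvCountB]
      · -- no "bob" starts at m: the counted predicate is unchanged on earlier indices
        have hcong : ∀ i ∈ List.range m, pvP l (m + 1) i = pvP l m i := by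
          intro i hi
          simp only [pvP, List.range_succ, List.any_append, List.any_cons, List.any_nil,
            hbob, Bool.and_false, Bool.or_false]
        rw [List.countP_congr (fun x hx => by rw [hcong x hx])]
        simp only [List.countP_cons, List.countP_nil, hlast]
        simp [pvAns, hbob, ih]

-- ===== VERDICT (by name: the statement is the Claim_ definition above) =====
theorem find_b_bob_occurrences_spec : Claim_equal_find_b_bob_occurrences := by
  intro text _
  unfold Spec_find_b_bob_occurrences
  rw [pvA_eq, pvB_eq, pvAns_countP]
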